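-- pv_equiv track=rewrite | github.com/kyeonji/coding-test-py | programmers_hopscotch.py | solution
-- ===== SOURCE A (Python) =====
-- def solution(land):
--     answer = 0
--
--     N = len(land)
--     for i in range(1, N):
--         for j in range(4):
--             land[i][j] += max(land[i - 1][:j] + land[i - 1][j + 1:])
--
--     answer = max(land[N - 1])
--     return answer
-- ===== SOURCE B (Python) =====
-- def solution(land):
--     # One-pass top-two scan of the previous row instead of A's per-column slice+max.
--     # Mutates land in place exactly as A does; equivalence is about the return value.
--     for i in range(1, len(land)):
--         prev = land[i - 1]
--         m1 = None   # largest value seen so far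
--         m2 = None   # largest value ignoring the first occurrence of m1
--         idx = -1    # index of the first occurrence of m1
--         dup = False # whether m1 occurs more than once
--         for k, v in enumerate(prev):
--             if m1 is None or v > m1:
--                 m2 = m1
--                 m1 = v
--                 idx = k
--                 dup = False
--             elif v == m1:
--                 dup = True
--                 if m2 is None or v > m2:
--                     m2 = v
--             else:
--                 if m2 is None or v > m2:
--                     m2 = v
--         for j in range(4):
--             land[i][j] += m1 if (dup or j != idx) else m2
--     return max(land[-1])
-- ===== Notes on version B (the rewrite author's own statement) =====
-- stated objective: alternative
-- what changed: B replaces A's per-column slice-and-max over the previous row (4 list slices + 4 max scans per row) by a single one-pass top-two scan of the previous row (max, its first index, a duplicate flag, and the runner-up), then adds max1 to every column except a unique-max column, which gets max2.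
import Mathlib
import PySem

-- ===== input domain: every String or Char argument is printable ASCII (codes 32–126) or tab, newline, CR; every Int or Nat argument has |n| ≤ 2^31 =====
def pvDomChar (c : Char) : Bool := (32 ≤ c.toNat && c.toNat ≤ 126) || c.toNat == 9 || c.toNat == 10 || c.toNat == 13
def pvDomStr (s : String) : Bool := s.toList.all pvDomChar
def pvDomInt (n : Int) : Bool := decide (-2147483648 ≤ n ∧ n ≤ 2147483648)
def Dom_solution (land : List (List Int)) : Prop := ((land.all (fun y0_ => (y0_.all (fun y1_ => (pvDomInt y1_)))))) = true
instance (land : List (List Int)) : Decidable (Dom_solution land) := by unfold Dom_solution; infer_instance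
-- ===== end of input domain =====

-- B replaces A's per-column slice+max over the previous row by a one-pass top-two scan
-- (max, its first index, duplicate flag, runner-up); both mutate land in place the same
-- way in Python — the equivalence proved here is about the return value.


-- ===== PORT A =====
-- max(land[i-1][:j] + land[i-1][j+1:]); .getD 0 is unreachable under Pre_ (the sliced list is nonempty there)
def addA (prev : List Int) (j : Int) : Int :=
  (PySem.List.max? (PySem.List.slice prev none (some j) ++ PySem.List.slice prev (some (j + 1)) none) (fun x => x)).getD 0

def solution (land : List (List Int)) : Int :=
  let N : Int := land.length
  let land2 :=
    (PySem.List.pyRange 1 N 1).foldl (fun L i =>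
      (PySem.List.pyRange 0 4 1).foldl (fun L j =>
        PySem.List.pySetD L i
          (PySem.List.pySetD (PySem.List.pyGetD L i []) j
            (PySem.List.pyGetD (PySem.List.pyGetD L i []) j 0 + addA (PySem.List.pyGetD L (i - 1) []) j))) L) land
  (PySem.List.max? (PySem.List.pyGetD land2 (N - 1) []) (fun x => x)).getD 0

-- ===== PORT B =====
-- one enumerate step of Source B's scan: state (m1, m2, idx, dup)
def bStep (s : Option Int × Option Int × Int × Bool) (kv : Int × Int) :
    Option Int × Option Int × Int × Bool :=
  let (m1, m2, idx, dup) := s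
  let (k, v) := kv
  match m1 with
  | none => (some v, m1, k, false)
  | some a =>
    if v > a then (some v, m1, k, false)
    else if v = a then
      (m1, (match m2 with | none => some v | some b => if v > b then some v else m2), idx, true)
    else
      (m1, (match m2 with | none => some v | some b => if v > b then some v else m2), idx, dup)

def bScan (prev : List Int) : Option Int × Option Int × Int × Bool :=
  (PySem.List.enumerate prev 0).foldl bStep (none, none, -1, false)

-- m1 if (dup or j != idx) else m2; .getD 0 is unreachable under Pre_
def addB (s : Option Int × Option Int × Int × Bool) (j : Int) : Int :=
  if s.2.2.2 = true ∨ j ≠ s.2.2.1 then s.1.getD 0 else s.2.1.getD 0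

def solution_alt (land : List (List Int)) : Int :=
  let land2 :=
    (PySem.List.pyRange 1 (land.length : Int) 1).foldl (fun L i =>
      let s := bScan (PySem.List.pyGetD L (i - 1) [])
      (PySem.List.pyRange 0 4 1).foldl (fun L j =>
        PySem.List.pySetD L i
          (PySem.List.pySetD (PySem.List.pyGetD L i []) j
            (PySem.List.pyGetD (PySem.List.pyGetD L i []) j 0 + addB s j))) L) land
  (PySem.List.max? (PySem.List.pyGetD land2 (-1) []) (fun x => x)).getD 0

-- ===== PRECONDITION & SPEC =====
-- Exactly the inputs on which the Python A returns normally: a nonempty land; with two or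
-- more rows the first row needs at least 2 entries and every later row at least 4 entries
-- (otherwise A raises IndexError or ValueError); a single row must itself be nonempty.
def Pre_solution (land : List (List Int)) : Prop :=
  land ≠ [] ∧ (land.length = 1 → land.headI ≠ []) ∧
  (2 ≤ land.length → 2 ≤ land.headI.length ∧ ∀ row ∈ land.tail, 4 ≤ row.length)
instance (land : List (List Int)) : Decidable (Pre_solution land) := by unfold Pre_solution; infer_instance

def pvWitness_solution : List (List Int) := [[1, 2, 3, 5], [5, 6, 7, 8], [4, 3, 2, 1]]

def Spec_solution (land : List (List Int)) (out : Int) : Prop := out = solution_alt land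
instance (land : List (List Int)) (out : Int) : Decidable (Spec_solution land out) := by unfold Spec_solution; infer_instance

-- ===== CLAIM (what is proved, stated in full; the proofs are below) =====
def Claim_equal_solution : Prop := ∀ (land : List (List Int)), Dom_solution land → Pre_solution land → Spec_solution land (solution land)

-- ===== LEMMAS AND PROOFS =====

-- value of Python max() on a list with a known greatest element
lemma maxD_of (xs : List Int) (m : Int) (hm : m ∈ xs) (hmax : ∀ x ∈ xs, x ≤ m) :
    (PySem.List.max? xs (fun x => x)).getD 0 = m := by
  cases h : PySem.List.max? xs (fun x => x) with
  | none =>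
    rw [PySem.List.max?_eq_none_iff] at h
    subst h; simp at hm
  | some m' =>
    have h1 := PySem.List.max?_mem h
    have h2 := PySem.List.max?_isMax h m hm
    simpa using le_antisymm (hmax m' h1) h2

lemma erase_append_self (p : List Int) (v : Int) : (p ++ [v]).eraseIdx p.length = p := by
  rw [List.eraseIdx_eq_take_drop_succ]; simp

-- the runner-up update `if m2 is None or v > m2: m2 = v` as a function
def m2upd (m2 : Option Int) (v : Int) : Option Int :=
  match m2 with | none => some v | some b => if v > b then some v else m2

lemma bStep_some (a : Int) (m2 : Option Int) (idx k v : Int) (dup : Bool) :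
    bStep (some a, m2, idx, dup) (k, v) =
      if v > a then (some v, some a, k, false)
      else if v = a then (some a, m2upd m2 v, idx, true)
      else (some a, m2upd m2 v, idx, dup) := by
  cases m2 <;> simp [bStep, m2upd]

-- scan-state invariant for Source B's top-two loop
def ScanInv (p : List Int) (s : Option Int × Option Int × Int × Bool) : Prop :=
  ∃ (M : Int) (i : Nat),
    i < p.length ∧ s.1 = some M ∧ s.2.2.1 = (i : Int) ∧
    p[i]? = some M ∧ (∀ k, k < i → p[k]? ≠ some M) ∧
    (∀ x ∈ p, x ≤ M) ∧
    (s.2.2.2 = true ↔ M ∈ p.eraseIdx i) ∧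
    (p.eraseIdx i ≠ [] → ∃ m, s.2.1 = some m ∧ m ∈ p.eraseIdx i ∧ ∀ x ∈ p.eraseIdx i, x ≤ m) ∧
    (p.eraseIdx i = [] → s.2.1 = none)

lemma bScan_append (p : List Int) (v : Int) :
    bScan (p ++ [v]) = bStep (bScan p) ((p.length : Int), v) := by
  unfold bScan
  rw [PySem.List.enumerate_append, List.foldl_append]
  simp [PySem.List.enumerate_cons, PySem.List.enumerate_nil]

lemma m2upd_spec (q : List Int) (m2 : Option Int) (v : Int)
    (hm2 : q ≠ [] → ∃ m, m2 = some m ∧ m ∈ q ∧ ∀ x ∈ q, x ≤ m)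
    (hm2n : q = [] → m2 = none) :
    ∃ m, m2upd m2 v = some m ∧ m ∈ q ++ [v] ∧ ∀ x ∈ q ++ [v], x ≤ m := by
  cases hm : m2 with
  | none =>
    have hq : q = [] := by
      by_contra hq
      obtain ⟨m, hm', _, _⟩ := hm2 hq
      rw [hm'] at hm; simp at hm
    subst hq
    exact ⟨v, rfl, by simp, by simp⟩
  | some b =>
    have hq : q ≠ [] := by
      intro hq; rw [hm2n hq] at hm; simp at hm
    obtain ⟨m, hm', hmem, hub⟩ := hm2 hq
    have hbm : b = m := by rw [hm] at hm'; injection hm'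
    subst hbm
    by_cases hv : v > b
    · refine ⟨v, by simp [m2upd, hv], by simp, ?_⟩
      intro x hx
      rcases List.mem_append.mp hx with hx | hx
      · exact le_of_lt (lt_of_le_of_lt (hub x hx) hv)
      · simp at hx; omega
    · refine ⟨b, by simp [m2upd, hv], List.mem_append_left _ hmem, ?_⟩
      intro x hx
      rcases List.mem_append.mp hx with hx | hx
      · exact hub x hx
      · simp at hx; omega

lemma bScan_inv (p : List Int) (h : p ≠ []) : ScanInv p (bScan p) := by
  induction p using List.reverseRecOn with
  | nil => exact absurd rfl h
  | append_singleton p v ih =>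
    rw [bScan_append]
    rcases eq_or_ne p [] with rfl | hp
    · refine ⟨v, 0, by simp, ?_⟩
      simp [bScan, PySem.List.enumerate_nil, bStep]
    · obtain ⟨M, i, hi, hm1, hidx, hgi, hfirst, hub, hdup, hm2, hm2n⟩ := ih hp
      rcases hscan : bScan p with ⟨m1, m2, idx, dup⟩
      rw [hscan] at hm1 hidx hdup hm2 hm2n
      simp only at hm1 hidx hdup hm2 hm2n
      subst hm1 hidx
      rw [bStep_some]
      rcases lt_trichotomy M v with hv | hv | hv
      · -- v > M : new max at index p.length
        rw [if_pos hv]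
        refine ⟨v, p.length, by simp, rfl, rfl, ?_, ?_, ?_, ?_, ?_, ?_⟩
        · simp
        · intro k hk hcontra
          rw [List.getElem?_append_left hk] at hcontra
          have : v ∈ p := List.mem_of_getElem? hcontra
          exact absurd (hub v this) (by omega)
        · intro x hx
          rcases List.mem_append.mp hx with hx | hx
          · exact le_of_lt (lt_of_le_of_lt (hub x hx) hv)
          · simp at hx; omega
        · rw [erase_append_self]
          simp only [Bool.false_eq_true, false_iff]
          intro hvp
          exact absurd (hub v hvp) (by omega)
        · rw [erase_append_self]
          intro _
          exact ⟨M, rfl, List.mem_of_getElem? hgi, hub⟩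
        · rw [erase_append_self]; intro hc; exact absurd hc hp
      · -- v == M : duplicate of the max
        rw [if_neg (by omega), if_pos hv.symm]
        have herase : (p ++ [v]).eraseIdx i = p.eraseIdx i ++ [v] :=
          List.eraseIdx_append_of_lt_length hi [v]
        obtain ⟨m, hmEq, hmMem, hmUb⟩ := m2upd_spec (p.eraseIdx i) m2 v hm2 hm2n
        refine ⟨M, i, by simp; omega, rfl, rfl, ?_, ?_, ?_, ?_, ?_, ?_⟩
        · rw [List.getElem?_append_left hi]; exact hgi
        · intro k hk
          rw [List.getElem?_append_left (lt_trans hk hi)]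
          exact hfirst k hk
        · intro x hx
          rcases List.mem_append.mp hx with hx | hx
          · exact hub x hx
          · simp at hx; omega
        · rw [herase]
          simp only [true_iff]
          exact List.mem_append_right _ (by simp; omega)
        · rw [herase]; intro _; exact ⟨m, hmEq, hmMem, hmUb⟩
        · rw [herase]; intro hc; simp at hc
      · -- v < M : max unchanged
        rw [if_neg (by omega), if_neg (by omega)]
        have herase : (p ++ [v]).eraseIdx i = p.eraseIdx i ++ [v] :=
          List.eraseIdx_append_of_lt_length hi [v]
        obtain ⟨m, hmEq, hmMem, hmUb⟩ := m2upd_spec (p.eraseIdx i) m2 v hm2 hm2n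
        refine ⟨M, i, by simp; omega, rfl, rfl, ?_, ?_, ?_, ?_, ?_, ?_⟩
        · rw [List.getElem?_append_left hi]; exact hgi
        · intro k hk
          rw [List.getElem?_append_left (lt_trans hk hi)]
          exact hfirst k hk
        · intro x hx
          rcases List.mem_append.mp hx with hx | hx
          · exact hub x hx
          · simp at hx; omega
        · rw [herase]
          simp only [List.mem_append]
          constructor
          · intro hd; exact Or.inl (hdup.mp hd)
          · intro hd
            rcases hd with hd | hd
            · exact hdup.mpr hd
            · simp at hd; omega
        · rw [herase]; intro _; exact ⟨m, hmEq, hmMem, hmUb⟩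
        · rw [herase]; intro hc; simp at hc
-- A's added value is the max over the previous row with entry j removed
lemma addA_eraseIdx (prev : List Int) (j : Int) (hj : 0 ≤ j) :
    addA prev j = (PySem.List.max? (prev.eraseIdx j.toNat) (fun x => x)).getD 0 := by
  unfold addA
  rw [PySem.List.slice_to _ hj, PySem.List.slice_from _ (by omega : (0:Int) ≤ j + 1)]
  rw [List.eraseIdx_eq_take_drop_succ]
  have : (j + 1).toNat = j.toNat + 1 := by omega
  rw [this]

lemma mem_eraseIdx_ne (p : List Int) (i j : Nat) (hi : i < p.length) (hij : i ≠ j) (M : Int)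
    (h : p[i]? = some M) : M ∈ p.eraseIdx j :=
  List.mem_eraseIdx_iff_getElem.mpr ⟨i, hi, hij, by simpa [List.getElem?_eq_getElem hi] using h⟩

-- the heart: A's slice-max equals B's top-two selection, per column
lemma add_eq (prev : List Int) (h2 : 2 ≤ prev.length) (j : Int) (hj : 0 ≤ j) :
    addA prev j = addB (bScan prev) j := by
  obtain ⟨M, i, hi, hm1, hidx, hgi, hfirst, hub, hdup, hm2, hm2n⟩ :=
    bScan_inv prev (by intro h; rw [h] at h2; simp at h2)
  have hsub : ∀ x ∈ prev.eraseIdx j.toNat, x ≤ M := fun x hx => hub x (List.mem_of_mem_eraseIdx hx)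
  rw [addA_eraseIdx prev j hj]
  unfold addB
  by_cases hji : j = (i : Int)
  · have hjn : j.toNat = i := by omega
    by_cases hd : (bScan prev).2.2.2 = true
    · rw [if_pos (Or.inl hd), hm1]
      simp only [Option.getD_some]
      exact maxD_of _ M (hjn ▸ hdup.mp hd) hsub
    · rw [if_neg (by rw [hidx]; simp [hd, hji])]
      have hlen : (prev.eraseIdx i).length = prev.length - 1 := by
        rw [List.length_eraseIdx]; simp [hi]
      have hne : prev.eraseIdx i ≠ [] := by
        intro hc; rw [hc] at hlen; simp at hlen; omega
      obtain ⟨m, hm2e, hmm, hmu⟩ := hm2 hne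
      rw [hm2e]
      simp only [Option.getD_some]
      rw [hjn]
      exact maxD_of _ m hmm hmu
  · rw [if_pos (Or.inr (by rw [hidx]; exact hji)), hm1]
    simp only [Option.getD_some]
    have hjn : i ≠ j.toNat := by omega
    exact maxD_of _ M (mem_eraseIdx_ne prev i j.toNat hi hjn M hgi) hsub

-- pySetD/pyGetD bookkeeping on the evolving land
lemma gd_set_self (L : List (List Int)) (i : Int) (r : List Int) (h0 : 0 ≤ i) (h1 : i < (L.length : Int)) :
    PySem.List.pyGetD (PySem.List.pySetD L i r) i [] = r := by
  rw [PySem.List.pySetD_of_nonneg _ _ h0, PySem.List.pyGetD_of_nonneg _ _ h0]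
  rw [List.getD_eq_getElem?_getD, List.getElem?_set_self (by omega)]
  rfl

lemma gd_set_ne (L : List (List Int)) (i m : Int) (r : List Int) (d : List Int)
    (h0i : 0 ≤ i) (h0m : 0 ≤ m) (hne : m ≠ i) :
    PySem.List.pyGetD (PySem.List.pySetD L i r) m d = PySem.List.pyGetD L m d := by
  rw [PySem.List.pySetD_of_nonneg _ _ h0i, PySem.List.pyGetD_of_nonneg _ _ h0m,
    PySem.List.pyGetD_of_nonneg _ _ h0m]
  rw [List.getD_eq_getElem?_getD, List.getD_eq_getElem?_getD,
    List.getElem?_set_ne (by omega : i.toNat ≠ m.toNat)]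

lemma set_set' (L : List (List Int)) (i : Int) (r r' : List Int) (h0 : 0 ≤ i) :
    PySem.List.pySetD (PySem.List.pySetD L i r) i r' = PySem.List.pySetD L i r' := by
  rw [PySem.List.pySetD_of_nonneg _ _ h0, PySem.List.pySetD_of_nonneg _ _ h0,
    PySem.List.pySetD_of_nonneg _ _ h0, List.set_set]

lemma set_self (L : List (List Int)) (i : Int) (h0 : 0 ≤ i) (h1 : i < (L.length : Int)) :
    PySem.List.pySetD L i (PySem.List.pyGetD L i []) = L := by
  rw [PySem.List.pySetD_of_nonneg _ _ h0, PySem.List.pyGetD_eq_getElem _ _ h0 h1,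
    List.set_getElem_self]

-- the inner 4-column loop only writes row i and only reads rows i-1 and i:
-- it is a pure update of row i with the previous row fixed
lemma inner_shape (g : List Int → Int → Int) (js : List Int) (L : List (List Int)) (i : Int)
    (h1 : 1 ≤ i) (hiL : i < (L.length : Int)) :
    js.foldl (fun L' j => PySem.List.pySetD L' i
        (PySem.List.pySetD (PySem.List.pyGetD L' i []) j
          (PySem.List.pyGetD (PySem.List.pyGetD L' i []) j 0 + g (PySem.List.pyGetD L' (i-1) []) j))) L
    = PySem.List.pySetD L i
        (js.foldl (fun row j => PySem.List.pySetD row j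
          (PySem.List.pyGetD row j 0 + g (PySem.List.pyGetD L (i-1) []) j)) (PySem.List.pyGetD L i [])) := by
  induction js generalizing L with
  | nil => simp only [List.foldl_nil]; exact (set_self L i (by omega) hiL).symm
  | cons j js ih =>
    simp only [List.foldl_cons]
    have h0 : (0:Int) ≤ i := by omega
    set r := PySem.List.pySetD (PySem.List.pyGetD L i []) j
      (PySem.List.pyGetD (PySem.List.pyGetD L i []) j 0 + g (PySem.List.pyGetD L (i-1) []) j) with hr
    rw [ih (PySem.List.pySetD L i r) (by rw [PySem.List.length_pySetD]; exact hiL)]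
    rw [gd_set_self L i r h0 hiL]
    simp only [gd_set_ne L i (i-1) r [] h0 (by omega) (by omega)]
    rw [set_set' L i r _ h0]

lemma rowfold_length (g : Int → Int) (js : List Int) (row : List Int) :
    (js.foldl (fun row j => PySem.List.pySetD row j (PySem.List.pyGetD row j 0 + g j)) row).length
      = row.length := by
  induction js generalizing row with
  | nil => rfl
  | cons j js ih => simp only [List.foldl_cons]; rw [ih, PySem.List.length_pySetD]

lemma map_length_set (L : List (List Int)) (i : Int) (r : List Int) (h0 : 0 ≤ i)
    (h1 : i < (L.length : Int)) (hr : r.length = (PySem.List.pyGetD L i []).length) :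
    (PySem.List.pySetD L i r).map List.length = L.map List.length := by
  rw [PySem.List.pySetD_of_nonneg _ _ h0, List.map_set]
  rw [PySem.List.pyGetD_eq_getElem _ _ h0 h1] at hr
  rw [hr]
  have hlt : i.toNat < (L.map List.length).length := by simp; omega
  have : L[i.toNat].length = (L.map List.length)[i.toNat]'hlt := by simp
  rw [this, List.set_getElem_self]

-- fold congruence under an invariant
lemma foldl_congr_inv {α β : Type} (P : α → Prop) (f g : α → β → α) (l : List β) (a : α)
    (hP : P a) (h : ∀ x ∈ l, ∀ acc, P acc → f acc x = g acc x ∧ P (f acc x)) :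
    l.foldl f a = l.foldl g a := by
  induction l generalizing a with
  | nil => rfl
  | cons x l ih =>
    simp only [List.foldl_cons]
    obtain ⟨he, hp⟩ := h x (by simp) a hP
    rw [← he]
    exact ih (f a x) hp (fun y hy => h y (by simp [hy]))

lemma foldl_inv {α β : Type} (P : α → Prop) (f : α → β → α) (l : List β) (a : α)
    (hP : P a) (h : ∀ x ∈ l, ∀ acc, P acc → P (f acc x)) : P (l.foldl f a) := by
  induction l generalizing a with
  | nil => exact hP
  | cons x l ih => exact ih (f a x) (h x (by simp) a hP) (fun y hy => h y (by simp [hy]))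

lemma pyGetD_neg_one (L : List (List Int)) (h : L ≠ []) (d : List Int) :
    PySem.List.pyGetD L (-1) d = PySem.List.pyGetD L ((L.length : Int) - 1) d := by
  have hl : 1 ≤ L.length := List.length_pos_iff.mpr h
  simp [PySem.List.pyGetD, PySem.List.pyGet?, PySem.List.pyIdx?, hl]
-- rows 0 .. N-2 of land (the rows read as `prev`) have ≥ 2 entries under Pre_
lemma pre_prev_len (land : List (List Int)) (hpre : Pre_solution land) (k : Int)
    (h0 : 0 ≤ k) (hk : k < (land.length : Int) - 1) :
    2 ≤ (PySem.List.pyGetD land k []).length := by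
  obtain ⟨hne, -, h2⟩ := hpre
  have hlen : 1 ≤ land.length := List.length_pos_iff.mpr hne
  have h2' := h2 (by omega)
  rw [PySem.List.pyGetD_eq_getElem _ _ h0 (by omega)]
  rcases Nat.eq_zero_or_pos k.toNat with hz | hp
  · have hh : land[k.toNat]'(by omega) = land.headI := by
      cases land with
      | nil => simp at hne
      | cons a l => simp [hz]
    rw [hh]; exact h2'.1
  · have hm1 : k.toNat - 1 < land.tail.length := by simp [List.length_tail]; omega
    have hh : land[k.toNat]'(by omega) = land.tail[k.toNat - 1]'hm1 := by
      rw [List.getElem_tail hm1]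
      congr 1
      omega
    rw [hh]
    exact le_trans (by norm_num) (h2'.2 _ (List.getElem_mem hm1))

-- step of A = step of B on any land whose row lengths match the original's
lemma step_eq (land L : List (List Int)) (i : Int)
    (hP : L.map List.length = land.map List.length)
    (h1 : 1 ≤ i) (hiN : i < (land.length : Int))
    (hprev : 2 ≤ (PySem.List.pyGetD land (i - 1) []).length) :
    ((PySem.List.pyRange 0 4 1).foldl (fun L' j => PySem.List.pySetD L' i
        (PySem.List.pySetD (PySem.List.pyGetD L' i []) j
          (PySem.List.pyGetD (PySem.List.pyGetD L' i []) j 0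
            + addA (PySem.List.pyGetD L' (i - 1) []) j))) L
      = (PySem.List.pyRange 0 4 1).foldl (fun L' j => PySem.List.pySetD L' i
        (PySem.List.pySetD (PySem.List.pyGetD L' i []) j
          (PySem.List.pyGetD (PySem.List.pyGetD L' i []) j 0
            + addB (bScan (PySem.List.pyGetD L (i - 1) [])) j))) L)
    ∧ ((PySem.List.pyRange 0 4 1).foldl (fun L' j => PySem.List.pySetD L' i
        (PySem.List.pySetD (PySem.List.pyGetD L' i []) j
          (PySem.List.pyGetD (PySem.List.pyGetD L' i []) j 0
            + addA (PySem.List.pyGetD L' (i - 1) []) j))) L).map List.length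
        = land.map List.length := by
  have hLlen : L.length = land.length := by simpa using congrArg List.length hP
  have hiL : i < (L.length : Int) := by rw [hLlen]; exact hiN
  have h1' : (i - 1).toNat < L.length := by omega
  have h2' : (i - 1).toNat < land.length := by omega
  have hgdlen : (PySem.List.pyGetD L (i - 1) []).length
      = (PySem.List.pyGetD land (i - 1) []).length := by
    rw [PySem.List.pyGetD_eq_getElem _ _ (by omega) (by omega),
      PySem.List.pyGetD_eq_getElem _ _ (by omega) (by omega)]
    calc L[(i - 1).toNat].length
        = (L.map List.length)[(i - 1).toNat]'(by simpa using h1') := by simp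
      _ = (land.map List.length)[(i - 1).toNat]'(by simpa using h2') := List.getElem_of_eq hP _
      _ = land[(i - 1).toNat].length := by simp
  have hprevL : 2 ≤ (PySem.List.pyGetD L (i - 1) []).length := by omega
  have hshapeA := inner_shape addA (PySem.List.pyRange 0 4 1) L i h1 hiL
  have hshapeB := inner_shape (fun _ j => addB (bScan (PySem.List.pyGetD L (i - 1) [])) j)
    (PySem.List.pyRange 0 4 1) L i h1 hiL
  constructor
  · rw [hshapeA, hshapeB]
    congr 1
    apply PySem.List.foldl_congr_mem
    intro row j hj
    obtain ⟨hj0, -⟩ := PySem.List.mem_pyRange_one.mp hj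
    rw [add_eq _ hprevL j hj0]
  · rw [hshapeA]
    rw [map_length_set L i _ (by omega) hiL
      (rowfold_length (fun j => addA (PySem.List.pyGetD L (i - 1) []) j) _ _)]
    exact hP
-- ===== VERDICT (by name: the statement is the Claim_ definition above) =====
theorem solution_spec : Claim_equal_solution := by
  unfold Claim_equal_solution
  intro land _hdom hpre
  unfold Spec_solution solution solution_alt
  dsimp only
  have hne : land ≠ [] := hpre.1
  have hlen1 : 1 ≤ land.length := List.length_pos_iff.mpr hne
  have hstep : ∀ i ∈ PySem.List.pyRange 1 (land.length : Int) 1,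
      ∀ L : List (List Int), L.map List.length = land.map List.length →
      ((fun (L : List (List Int)) (i : Int) =>
          (PySem.List.pyRange 0 4 1).foldl (fun L' j => PySem.List.pySetD L' i
            (PySem.List.pySetD (PySem.List.pyGetD L' i []) j
              (PySem.List.pyGetD (PySem.List.pyGetD L' i []) j 0
                + addA (PySem.List.pyGetD L' (i - 1) []) j))) L) L i
        = (fun (L : List (List Int)) (i : Int) =>
          (PySem.List.pyRange 0 4 1).foldl (fun L' j => PySem.List.pySetD L' i
            (PySem.List.pySetD (PySem.List.pyGetD L' i []) j
              (PySem.List.pyGetD (PySem.List.pyGetD L' i []) j 0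
                + addB (bScan (PySem.List.pyGetD L (i - 1) [])) j))) L) L i)
      ∧ ((fun (L : List (List Int)) (i : Int) =>
          (PySem.List.pyRange 0 4 1).foldl (fun L' j => PySem.List.pySetD L' i
            (PySem.List.pySetD (PySem.List.pyGetD L' i []) j
              (PySem.List.pyGetD (PySem.List.pyGetD L' i []) j 0
                + addA (PySem.List.pyGetD L' (i - 1) []) j))) L) L i).map List.length
          = land.map List.length := by
    intro i hi L hP
    obtain ⟨h1, hiN⟩ := PySem.List.mem_pyRange_one.mp hi
    exact step_eq land L i hP h1 hiN (pre_prev_len land hpre (i - 1) (by omega) (by omega))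
  have hfold := foldl_congr_inv (fun L => L.map List.length = land.map List.length) _ _
    (PySem.List.pyRange 1 (land.length : Int) 1) land rfl hstep
  have hPfin := foldl_inv (fun L => L.map List.length = land.map List.length) _
    (PySem.List.pyRange 1 (land.length : Int) 1) land rfl
    (fun x hx acc hacc => (hstep x hx acc hacc).2)
  rw [hfold] at hPfin ⊢
  set L2 := List.foldl (fun (L : List (List Int)) (i : Int) =>
      List.foldl (fun (L' : List (List Int)) (j : Int) => PySem.List.pySetD L' i
        (PySem.List.pySetD (PySem.List.pyGetD L' i []) j
          (PySem.List.pyGetD (PySem.List.pyGetD L' i []) j 0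
            + addB (bScan (PySem.List.pyGetD L (i - 1) [])) j)))
        L (PySem.List.pyRange 0 4 1)) land (PySem.List.pyRange 1 (land.length : Int) 1) with hL2
  have hL2len : L2.length = land.length := by simpa using congrArg List.length hPfin
  have hL2ne : L2 ≠ [] := by
    intro h
    rw [h] at hL2len
    simp at hL2len
    omega
  rw [pyGetD_neg_one L2 hL2ne []]
  rw [hL2len]
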